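-- pv_equiv track=rewrite | github.com/paiml/depyler | examples/hard_prac_cache_writethrough.py | wt_backing_read
-- ===== SOURCE A (Python) =====
-- def wt_backing_read(store: list[int], store_size: int, k: int) -> int:
--     """Read from backing store. Returns -1 on miss."""
--     i: int = 0
--     while i < store_size:
--         sk: int = store[i * 2]
--         if sk == k:
--             result: int = store[i * 2 + 1]
--             return result
--         i = i + 1
--     return 0 - 1
-- ===== SOURCE B (Python) =====
-- def wt_backing_read(store: list[int], store_size: int, k: int) -> int:
--     """Read from backing store. Returns -1 on miss."""
--     idx: dict[int, int] = {}
--     for i in reversed(range(store_size)):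
--         idx[store[2 * i]] = store[2 * i + 1]
--     return idx.get(k, -1)
-- ===== Notes on version B (the rewrite author's own statement) =====
-- stated objective: alternative
-- what changed: Replaces the sequential while-loop key scan by building a dict index over the store_size pairs in reverse order (so the first occurrence of a duplicate key wins, matching A's first-match scan) followed by a single idx.get(k, -1) lookup.
-- outside the precondition, e.g. on wt_backing_read([1, 2], 2, 1): A returns 2, B raises IndexError
import Mathlib
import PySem

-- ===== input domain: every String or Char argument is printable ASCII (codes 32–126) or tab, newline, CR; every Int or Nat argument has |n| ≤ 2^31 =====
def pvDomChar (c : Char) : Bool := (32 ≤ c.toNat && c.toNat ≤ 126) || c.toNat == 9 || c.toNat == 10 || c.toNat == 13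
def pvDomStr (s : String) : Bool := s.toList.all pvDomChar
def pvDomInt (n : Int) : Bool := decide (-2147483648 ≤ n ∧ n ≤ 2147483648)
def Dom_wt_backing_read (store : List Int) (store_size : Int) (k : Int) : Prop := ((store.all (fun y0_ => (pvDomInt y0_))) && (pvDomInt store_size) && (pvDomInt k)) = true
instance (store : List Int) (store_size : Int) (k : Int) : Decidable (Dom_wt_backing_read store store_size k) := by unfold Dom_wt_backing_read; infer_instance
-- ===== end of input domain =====

-- B builds a dict index over the store_size key/value pairs in reverse order and answers with one
-- lookup, instead of A's sequential first-match scan; same O(store_size) cost, different structure.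


-- ===== PORT A =====
-- while i < store_size: read store[i*2], compare to k, return store[i*2+1] on hit, else i += 1.
-- Indexing uses pyGetD with default 0; Pre_ guarantees the indices are in range, so this is exact.
def wtA_go (store : List Int) (store_size : Int) (k : Int) (i : Int) : Int :=
  if _h : i < store_size then
    let sk : Int := PySem.List.pyGetD store (i * 2) 0
    if sk = k then PySem.List.pyGetD store (i * 2 + 1) 0
    else wtA_go store store_size k (i + 1)
  else 0 - 1
termination_by (store_size - i).toNat
decreasing_by omega

def wt_backing_read (store : List Int) (store_size : Int) (k : Int) : Int :=
  wtA_go store store_size k 0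

-- ===== PORT B =====
-- for i in reversed(range(store_size)): idx[store[2*i]] = store[2*i+1]; return idx.get(k, -1)
def wt_backing_read_alt (store : List Int) (store_size : Int) (k : Int) : Int :=
  let idx : PySem.Dict Int Int :=
    (PySem.List.pyRange 0 store_size 1).reverse.foldl
      (fun d i => d.insert (PySem.List.pyGetD store (2 * i) 0) (PySem.List.pyGetD store (2 * i + 1) 0))
      PySem.Dict.empty
  idx.getD k (-1)

-- ===== PRECONDITION & SPEC =====
-- Pre_ restricts to the natural domain where the store really holds store_size pairs (or the size is
-- ≤ 0 and nothing is read). Outside it Python A raises IndexError unless it happens to hit k in an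
-- early in-range pair, while B (which reads all store_size pairs) always raises IndexError there.
def Pre_wt_backing_read (store : List Int) (store_size : Int) (k : Int) : Prop :=
  store_size ≤ 0 ∨ 2 * store_size ≤ (store.length : Int)
instance (store : List Int) (store_size : Int) (k : Int) : Decidable (Pre_wt_backing_read store store_size k) := by unfold Pre_wt_backing_read; infer_instance
def pvWitness_wt_backing_read : List Int × Int × Int := ([5, 7, 2, 9], 2, 2)

def Spec_wt_backing_read (store : List Int) (store_size : Int) (k : Int) (out : Int) : Prop := out = wt_backing_read_alt store store_size k
instance (store : List Int) (store_size : Int) (k : Int) (out : Int) : Decidable (Spec_wt_backing_read store store_size k out) := by unfold Spec_wt_backing_read; infer_instance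

-- ===== CLAIM (what is proved, stated in full; the proofs are below) =====
def Claim_equal_wt_backing_read : Prop := ∀ (store : List Int) (store_size : Int) (k : Int), Dom_wt_backing_read store store_size k → Pre_wt_backing_read store store_size k → Spec_wt_backing_read store store_size k (wt_backing_read store store_size k)

-- ===== LEMMAS AND PROOFS =====

-- Looking up k in the dict obtained by foldr-inserting (key i ↦ val i) along l returns the value of
-- the FIRST i ∈ l whose key matches k (later foldr inserts, i.e. earlier list elements, overwrite).
theorem lookup_foldr_insert (key val : Int → Int) (k dflt : Int) :
    ∀ (l : List Int) (d0 : PySem.Dict Int Int),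
      (l.foldr (fun i d => d.insert (key i) (val i)) d0).getD k dflt =
        (match l.find? (fun i => key i == k) with
         | some i => val i
         | none => d0.getD k dflt) := by
  intro l
  induction l with
  | nil => intro d0; simp
  | cons i t ih =>
    intro d0
    simp only [List.foldr_cons, List.find?_cons]
    by_cases h : key i = k
    · simp [h, PySem.Dict.getD_insert_self]
    · have hb : (key i == k) = false := by simp [h]
      rw [PySem.Dict.getD_insert_of_ne _ _ _ (fun e => h e.symm), ih]
      simp [hb]

-- A's loop from index i is the same first-match search over range(i, store_size).
theorem wtA_go_eq_find (store : List Int) (store_size k : Int) :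
    ∀ (i : Int),
      wtA_go store store_size k i =
        (match (PySem.List.pyRange i store_size 1).find?
            (fun j => PySem.List.pyGetD store (j * 2) 0 == k) with
         | some j => PySem.List.pyGetD store (j * 2 + 1) 0
         | none => 0 - 1) := by
  intro i
  induction i using wtA_go.induct store store_size k with
  | case3 i h =>
    rw [wtA_go, PySem.List.pyRange_one_eq_nil (by omega)]
    simp [h]
  | case1 i h sk hsk =>
    rw [wtA_go, PySem.List.pyRange_one_cons h]
    simp only [sk] at hsk
    simp [h, hsk]
  | case2 i h sk hsk ih =>
    rw [wtA_go, PySem.List.pyRange_one_cons h]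
    simp only [sk] at hsk
    simp only [List.find?_cons]
    have hb : (PySem.List.pyGetD store (i * 2) 0 == k) = false := by
      simpa using hsk
    simp only [hb]
    rw [← ih, wtA_go]
    simp [h, hsk]

-- ===== VERDICT (by name: the statement is the Claim_ definition above) =====
theorem wt_backing_read_spec : Claim_equal_wt_backing_read := by
  intro store store_size k _hdom _hpre
  unfold Spec_wt_backing_read wt_backing_read wt_backing_read_alt
  rw [List.foldl_reverse, lookup_foldr_insert, wtA_go_eq_find]
  have hkey : (fun j => PySem.List.pyGetD store (j * 2) 0 == k)
      = (fun i => PySem.List.pyGetD store (2 * i) 0 == k) := by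
    funext j; rw [Int.mul_comm]
  rw [hkey]
  cases hf : (PySem.List.pyRange 0 store_size 1).find? (fun i => PySem.List.pyGetD store (2 * i) 0 == k) with
  | none => simp [PySem.Dict.getD, PySem.Dict.get?, PySem.Dict.empty]
  | some j => simp [Int.mul_comm]
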